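-- pv_equiv track=rewrite | github.com/ENTERPILOT/ai-model-list | pipeline/normalize.py | _display_name_from_xai_model_id
-- ===== SOURCE A (Python) =====
-- def _display_name_from_xai_model_id(model_id: str) -> str:
--     parts = model_id.split("-")
--     display_parts: list[str] = []
--     index = 0
--     while index < len(parts):
--         current = parts[index]
--         if current.isdigit() and index + 1 < len(parts) and parts[index + 1].isdigit():
--             display_parts.append(f"{current}.{parts[index + 1]}")
--             index += 2
--             continue
--
--         if current.startswith("grok"):
--             display_parts.append(current.replace("grok", "Grok", 1))
--         elif current.replace(".", "", 1).isdigit():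
--             display_parts.append(current)
--         else:
--             display_parts.append(current.title())
--         index += 1
--
--     return " ".join(display_parts)
-- ===== SOURCE B (Python) =====
-- def _display_name_from_xai_model_id(model_id: str) -> str:
--     out: list[str] = []
--     run: list[str] = []  # current maximal run of consecutive all-digit parts
--
--     def flush() -> None:
--         # pair up the run greedily: chunks of two joined by '.', odd leftover alone
--         for j in range(0, len(run), 2):
--             out.append(".".join(run[j:j + 2]))
--         run.clear()
--
--     for part in model_id.split("-"):
--         if part.isdigit():
--             run.append(part)
--             continue
--         flush()
--         if part.startswith("grok"):
--             out.append(part.replace("grok", "Grok", 1))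
--         elif part.replace(".", "", 1).isdigit():
--             out.append(part)
--         else:
--             out.append(part.title())
--     flush()
--     return " ".join(out)
-- ===== Notes on version B (the rewrite author's own statement) =====
-- stated objective: alternative
-- what changed: Replaces A's index-walking while-loop (which pairs adjacent digit parts by looking ahead and advancing the index by 1 or 2) with a run-accumulator scan: consecutive all-digit parts are collected into a run, each maximal run is flushed as dot-joined chunks of two, and non-digit parts are formatted individually between runs.
import Mathlib
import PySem

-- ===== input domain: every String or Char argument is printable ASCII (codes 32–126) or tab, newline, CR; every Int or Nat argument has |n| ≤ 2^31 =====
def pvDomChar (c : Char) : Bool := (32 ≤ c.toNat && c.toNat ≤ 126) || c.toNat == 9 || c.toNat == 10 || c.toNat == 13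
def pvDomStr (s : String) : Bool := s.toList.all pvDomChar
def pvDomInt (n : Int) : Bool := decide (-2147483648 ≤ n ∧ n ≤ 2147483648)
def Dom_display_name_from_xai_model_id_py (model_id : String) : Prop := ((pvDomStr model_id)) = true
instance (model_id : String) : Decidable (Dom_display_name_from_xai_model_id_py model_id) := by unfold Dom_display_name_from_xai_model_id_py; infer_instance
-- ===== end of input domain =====

-- B replaces A's index-walking while-loop by a run-accumulator scan: it collects each
-- maximal run of consecutive all-digit parts and flushes it as chunks of two joined by
-- '.'; objective: alternative decomposition, same cost.

-- Shared hand ports of two Python str primitives PySem lacks (exact on ASCII):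
-- s.replace(old, new, 1): replace the first occurrence of old.
def pvReplOnce (old new : List Char) : List Char → List Char
  | [] => if old.isPrefixOf ([] : List Char) then new else []
  | c :: rest =>
      if old.isPrefixOf (c :: rest) then new ++ (c :: rest).drop old.length
      else c :: pvReplOnce old new rest

-- s.title(): uppercase a letter not preceded by a letter, lowercase other letters
-- (exact for ASCII, where Python's "cased" characters are exactly the letters).
def pvTitle (prevAlpha : Bool) : List Char → List Char
  | [] => []
  | c :: rest =>
      if PySem.Chars.isalpha c then
        (if prevAlpha then PySem.Chars.lowerChar c else PySem.Chars.upperChar c) :: pvTitle true rest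
      else c :: pvTitle false rest

-- ===== PORT A =====
-- A's while-loop: one recursion over parts that both pairs adjacent digit parts
-- and formats each emitted piece in place (branches in A's order).
def pvWhileA : List (List Char) → List (List Char)
  | [] => []
  | current :: rest =>
      match rest with
      | next :: rest2 =>
          if PySem.Chars.strIsdigit current && PySem.Chars.strIsdigit next then
            (current ++ '.' :: next) :: pvWhileA rest2
          else
            (if PySem.Chars.startswith current ['g','r','o','k'] then
                pvReplOnce ['g','r','o','k'] ['G','r','o','k'] current
             else if PySem.Chars.strIsdigit (pvReplOnce ['.'] [] current) then current
             else pvTitle false current) :: pvWhileA (next :: rest2)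
      | [] =>
          [if PySem.Chars.startswith current ['g','r','o','k'] then
              pvReplOnce ['g','r','o','k'] ['G','r','o','k'] current
           else if PySem.Chars.strIsdigit (pvReplOnce ['.'] [] current) then current
           else pvTitle false current]

def display_name_from_xai_model_id_py (model_id : String) : String :=
  String.mk (PySem.Chars.join [' '] (pvWhileA (PySem.Chars.splitOn model_id.toList ['-'])))

-- ===== PORT B =====
-- flush(): "for j in range(0, len(run), 2): out.append('.'.join(run[j:j+2]))" —
-- chunks of two joined by '.', an odd leftover alone.
def pvFlush : List (List Char) → List (List Char)
  | [] => []
  | [a] => [a]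
  | a :: b :: rest => (a ++ '.' :: b) :: pvFlush rest

-- the non-digit formatting branch of B's for-loop.
def pvFormatPart (p : List Char) : List Char :=
  if PySem.Chars.startswith p ['g','r','o','k'] then
    pvReplOnce ['g','r','o','k'] ['G','r','o','k'] p
  else if PySem.Chars.strIsdigit (pvReplOnce ['.'] [] p) then p
  else pvTitle false p

-- B's for-loop over the parts with accumulators out and run.
def pvScanB (out run : List (List Char)) : List (List Char) → List (List Char)
  | [] => out ++ pvFlush run
  | p :: rest =>
      if PySem.Chars.strIsdigit p then pvScanB out (run ++ [p]) rest
      else pvScanB (out ++ pvFlush run ++ [pvFormatPart p]) [] rest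

def display_name_from_xai_model_id_py_alt (model_id : String) : String :=
  String.mk (PySem.Chars.join [' '] (pvScanB [] [] (PySem.Chars.splitOn model_id.toList ['-'])))

-- ===== PRECONDITION & SPEC =====
def Spec_display_name_from_xai_model_id_py (model_id : String) (out : String) : Prop := out = display_name_from_xai_model_id_py_alt model_id
instance (model_id : String) (out : String) : Decidable (Spec_display_name_from_xai_model_id_py model_id out) := by unfold Spec_display_name_from_xai_model_id_py; infer_instance

-- ===== CLAIM (what is proved, stated in full; the proofs are below) =====
def Claim_equal_display_name_from_xai_model_id_py : Prop := ∀ (model_id : String), Dom_display_name_from_xai_model_id_py model_id → Spec_display_name_from_xai_model_id_py model_id (display_name_from_xai_model_id_py model_id)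

-- ===== LEMMAS AND PROOFS =====

-- Removing one '.' from an all-digit string changes nothing (no '.' occurs).
lemma pv_replOnce_dot_digit {a : List Char} (h : a.all PySem.Chars.isdigit = true) :
    pvReplOnce ['.'] [] a = a := by
  induction a with
  | nil => simp [pvReplOnce, List.isPrefixOf]
  | cons c cs ih =>
    simp only [List.all_cons, Bool.and_eq_true] at h
    have hc : ('.' == c) = false := by
      simp only [beq_eq_false_iff_ne, ne_eq]
      rintro rfl
      have : ('0' ≤ '.' ∧ '.' ≤ '9') := by
        simpa [PySem.Chars.isdigit] using h.1
      simp [Char.le_def] at this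
    simp [pvReplOnce, List.isPrefixOf, hc, ih h.2]

-- An all-digit part does not start with "grok".
lemma pv_digit_not_grok {a : List Char} (h : PySem.Chars.strIsdigit a = true) :
    PySem.Chars.startswith a ['g','r','o','k'] = false := by
  cases a with
  | nil => simp [PySem.Chars.strIsdigit] at h
  | cons c cs =>
    simp only [PySem.Chars.strIsdigit, PySem.Chars.isdigit, Bool.and_eq_true, List.all_cons,
      decide_eq_true_eq] at h
    have hc : ('g' == c) = false := by
      simp only [beq_eq_false_iff_ne, ne_eq]
      rintro rfl
      have := h.2.1.2
      simp [Char.le_def] at this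
    simp [PySem.Chars.startswith, List.isPrefixOf, hc]

-- A's formatting branch keeps an all-digit part unchanged.
lemma pv_fmt_digit {a : List Char} (h : PySem.Chars.strIsdigit a = true) :
    pvFormatPart a = a := by
  unfold pvFormatPart
  have h' : a.all PySem.Chars.isdigit = true := by
    simp only [PySem.Chars.strIsdigit, Bool.and_eq_true] at h
    exact h.2
  rw [pv_digit_not_grok h, pv_replOnce_dot_digit h', h]
  simp

-- On an all-digit run, A's loop produces exactly the chunks-of-two pairing.
lemma pv_whileA_digit_run : ∀ run : List (List Char),
    (∀ x ∈ run, PySem.Chars.strIsdigit x = true) → pvWhileA run = pvFlush run := by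
  intro run
  induction run using pvFlush.induct with
  | case1 => intro _; rfl
  | case2 a =>
    intro h
    have ha := h a (by simp)
    have := pv_fmt_digit ha
    unfold pvFormatPart at this
    simpa [pvWhileA, pvFlush] using this
  | case3 a b rest ih =>
    intro h
    have ha := h a (by simp)
    have hb := h b (by simp)
    rw [pvWhileA, pvFlush, ih (fun x hx => h x (by simp [hx]))]
    simp [ha, hb]

-- A's loop on run ++ p :: rest (run all-digit, p not): flush the run, format p, continue.
lemma pv_whileA_flush : ∀ (run : List (List Char)) (p : List Char) (rest : List (List Char)),
    (∀ x ∈ run, PySem.Chars.strIsdigit x = true) → PySem.Chars.strIsdigit p = false →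
    pvWhileA (run ++ p :: rest) = pvFlush run ++ pvFormatPart p :: pvWhileA rest := by
  intro run
  induction run using pvFlush.induct with
  | case1 =>
    intro p rest _ hp
    cases rest with
    | nil => simp [pvWhileA, pvFlush, pvFormatPart, hp]
    | cons q qs => simp [pvWhileA, pvFlush, pvFormatPart, hp]
  | case2 a =>
    intro p rest h hp
    have ha := h a (by simp)
    have hfa := pv_fmt_digit ha
    unfold pvFormatPart at hfa
    cases rest with
    | nil => simp [pvWhileA, pvFlush, pvFormatPart, hp, ha, hfa]
    | cons q qs => simp [pvWhileA, pvFlush, pvFormatPart, hp, ha, hfa]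
  | case3 a b rest' ih =>
    intro p rest h hp
    have ha := h a (by simp)
    have hb := h b (by simp)
    simp only [List.cons_append]
    rw [pvWhileA]
    simp only [ha, hb, Bool.and_self]
    rw [ih p rest (fun x hx => h x (by simp [hx])) hp, pvFlush]
    simp

-- The run-accumulator scan computes A's loop on run ++ ps.
lemma pv_scanB_eq : ∀ (ps out run : List (List Char)),
    (∀ x ∈ run, PySem.Chars.strIsdigit x = true) →
    pvScanB out run ps = out ++ pvWhileA (run ++ ps) := by
  intro ps
  induction ps with
  | nil =>
    intro out run h
    rw [pvScanB]
    simp [pv_whileA_digit_run run h]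
  | cons p rest ih =>
    intro out run h
    rw [pvScanB]
    by_cases hp : PySem.Chars.strIsdigit p = true
    · rw [if_pos hp, ih out (run ++ [p])
        (by intro x hx; rcases List.mem_append.1 hx with hx | hx
            · exact h x hx
            · simp at hx; subst hx; exact hp)]
      simp
    · rw [if_neg hp, ih _ [] (by simp)]
      rw [pv_whileA_flush run p rest h (Bool.eq_false_iff.mpr hp)]
      simp

-- ===== VERDICT (by name: the statement is the Claim_ definition above) =====
theorem display_name_from_xai_model_id_py_spec : Claim_equal_display_name_from_xai_model_id_py := by
  intro model_id _
  unfold Spec_display_name_from_xai_model_id_py display_name_from_xai_model_id_py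
    display_name_from_xai_model_id_py_alt
  rw [pv_scanB_eq _ _ _ (by simp)]
  simp
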